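-- pv_equiv track=rewrite | github.com/msand14/Arabic-to-Roman-Number-Conversion | arabicToRoman.py | digitConversion
-- ===== SOURCE A (Python) =====
-- def digitConversion(auxNum: str, middleNum: str, endNum: str, arabNum: int):
--     """
--     Converts an Arabic Number(Units, Tens or Hundreds) into a Roman Number.
--     :param auxNum: Iterative Roman letter to add for numbers 1-3, around
--                    middleNum or before endNum.
--         Example: auxNum = I: (1-3) I, II, III
--                              (around middleNum: V) (4) IV, (6-8) VI, VII, VIII
--                              (before endNum: X) (9) IX
--     :param middleNum: Roman number that represents the middle of the range
--                     (5:V, 50:L, 500:D)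
--     :param endNum: Roman number that represents the end of the range
--                     (10:X, 100:C, 1000:M)
--     :param arabNum: Arabic number that represents Units,
--                      Tens or Hundreds and that will be transformed.
--     :return strRomanNum: Roman number to return, that represents Units,
--                          Tens or Hundreds.
--     """
--     strRomanNum = ''
--     if 4 > arabNum > 0:
--         for i in range(0, arabNum):
--             strRomanNum += auxNum
--     elif arabNum == 5:
--         strRomanNum += middleNum
--     elif arabNum == 4:
--         strRomanNum += auxNum + middleNum
--     elif 5 < arabNum < 9:
--         strRomanNum = middleNum
--         for i in range(5, arabNum):
--             strRomanNum += auxNum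
--     elif arabNum == 9:
--         strRomanNum += auxNum + endNum
--     return strRomanNum
-- ===== SOURCE B (Python) =====
-- def digitConversion(auxNum: str, middleNum: str, endNum: str, arabNum: int):
--     table = {
--         1: auxNum,
--         2: auxNum * 2,
--         3: auxNum * 3,
--         4: auxNum + middleNum,
--         5: middleNum,
--         6: middleNum + auxNum,
--         7: middleNum + auxNum * 2,
--         8: middleNum + auxNum * 3,
--         9: auxNum + endNum,
--     }
--     return table.get(arabNum, '')
-- ===== Notes on version B (the rewrite author's own statement) =====
-- stated objective: simpler
-- what changed: Replaced the five-way branch cascade with accumulation loops by a precomputed digit->fragment dict and a single lookup with default ''.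
import Mathlib
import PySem

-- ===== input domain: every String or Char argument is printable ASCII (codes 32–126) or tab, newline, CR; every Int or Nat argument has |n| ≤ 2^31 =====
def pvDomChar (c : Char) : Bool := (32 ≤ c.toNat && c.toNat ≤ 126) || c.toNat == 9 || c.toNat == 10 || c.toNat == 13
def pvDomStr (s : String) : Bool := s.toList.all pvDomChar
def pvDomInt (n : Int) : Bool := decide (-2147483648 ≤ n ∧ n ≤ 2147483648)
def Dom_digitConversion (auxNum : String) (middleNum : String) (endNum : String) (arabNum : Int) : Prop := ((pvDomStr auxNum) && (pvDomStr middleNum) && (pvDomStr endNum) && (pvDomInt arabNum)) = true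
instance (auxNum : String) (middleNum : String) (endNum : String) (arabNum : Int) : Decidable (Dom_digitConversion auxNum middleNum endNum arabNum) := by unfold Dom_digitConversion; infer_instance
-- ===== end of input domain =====

-- B replaces A's branch cascade and accumulation loops by a precomputed digit->fragment table and one lookup (objective: simpler).

-- ===== PORT A =====
def digitConversion (auxNum : String) (middleNum : String) (endNum : String) (arabNum : Int) : String :=
  let strRomanNum := ""
  if 4 > arabNum ∧ arabNum > 0 then
    (PySem.List.pyRange 0 arabNum 1).foldl (fun acc _ => acc ++ auxNum) strRomanNum
  else if arabNum = 5 then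
    strRomanNum ++ middleNum
  else if arabNum = 4 then
    strRomanNum ++ (auxNum ++ middleNum)
  else if 5 < arabNum ∧ arabNum < 9 then
    (PySem.List.pyRange 5 arabNum 1).foldl (fun acc _ => acc ++ auxNum) middleNum
  else if arabNum = 9 then
    strRomanNum ++ (auxNum ++ endNum)
  else
    strRomanNum

-- ===== PORT B =====
def digitConversion_alt (auxNum : String) (middleNum : String) (endNum : String) (arabNum : Int) : String :=
  let table : PySem.Dict Int String := PySem.Dict.ofList
    [ (1, auxNum)
    , (2, auxNum ++ auxNum)
    , (3, auxNum ++ auxNum ++ auxNum)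
    , (4, auxNum ++ middleNum)
    , (5, middleNum)
    , (6, middleNum ++ auxNum)
    , (7, middleNum ++ (auxNum ++ auxNum))
    , (8, middleNum ++ (auxNum ++ auxNum ++ auxNum))
    , (9, auxNum ++ endNum) ]
  table.getD arabNum ""

-- ===== PRECONDITION & SPEC =====
def Spec_digitConversion (auxNum : String) (middleNum : String) (endNum : String) (arabNum : Int) (out : String) : Prop := out = digitConversion_alt auxNum middleNum endNum arabNum
instance (auxNum : String) (middleNum : String) (endNum : String) (arabNum : Int) (out : String) : Decidable (Spec_digitConversion auxNum middleNum endNum arabNum out) := by unfold Spec_digitConversion; infer_instance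

-- ===== CLAIM (what is proved, stated in full; the proofs are below) =====
def Claim_equal_digitConversion : Prop := ∀ (auxNum : String) (middleNum : String) (endNum : String) (arabNum : Int), Dom_digitConversion auxNum middleNum endNum arabNum → Spec_digitConversion auxNum middleNum endNum arabNum (digitConversion auxNum middleNum endNum arabNum)

-- ===== LEMMAS AND PROOFS =====

-- ===== VERDICT (by name: the statement is the Claim_ definition above) =====
theorem digitConversion_spec : Claim_equal_digitConversion := by
  intro a m e n _
  unfold Spec_digitConversion digitConversion digitConversion_alt
  simp only [PySem.Dict.ofList, PySem.Dict.update, List.foldl,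
    PySem.Dict.getD_insert, PySem.Dict.getD_empty]
  have H : n = 1 ∨ n = 2 ∨ n = 3 ∨ n = 4 ∨ n = 5 ∨ n = 6 ∨ n = 7 ∨ n = 8 ∨ n = 9 ∨
      (¬(4 > n ∧ n > 0) ∧ n ≠ 5 ∧ n ≠ 4 ∧ ¬(5 < n ∧ n < 9) ∧ n ≠ 9) := by omega
  rcases H with rfl|rfl|rfl|rfl|rfl|rfl|rfl|rfl|rfl|⟨h1,h2,h3,h4,h5⟩
  · norm_num [PySem.List.pyRange, List.foldl, String.append_assoc, show List.range (Int.toNat 1) = [0] by decide, show List.range (Int.toNat 2) = [0, 1] by decide, show List.range (Int.toNat 3) = [0, 1, 2] by decide]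
  · norm_num [PySem.List.pyRange, List.foldl, String.append_assoc, show List.range (Int.toNat 1) = [0] by decide, show List.range (Int.toNat 2) = [0, 1] by decide, show List.range (Int.toNat 3) = [0, 1, 2] by decide]
  · norm_num [PySem.List.pyRange, List.foldl, String.append_assoc, show List.range (Int.toNat 1) = [0] by decide, show List.range (Int.toNat 2) = [0, 1] by decide, show List.range (Int.toNat 3) = [0, 1, 2] by decide]
  · norm_num [PySem.List.pyRange, List.foldl, String.append_assoc, show List.range (Int.toNat 1) = [0] by decide, show List.range (Int.toNat 2) = [0, 1] by decide, show List.range (Int.toNat 3) = [0, 1, 2] by decide]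
  · norm_num [PySem.List.pyRange, List.foldl, String.append_assoc, show List.range (Int.toNat 1) = [0] by decide, show List.range (Int.toNat 2) = [0, 1] by decide, show List.range (Int.toNat 3) = [0, 1, 2] by decide]
  · norm_num [PySem.List.pyRange, List.foldl, String.append_assoc, show List.range (Int.toNat 1) = [0] by decide, show List.range (Int.toNat 2) = [0, 1] by decide, show List.range (Int.toNat 3) = [0, 1, 2] by decide]
  · norm_num [PySem.List.pyRange, List.foldl, String.append_assoc, show List.range (Int.toNat 1) = [0] by decide, show List.range (Int.toNat 2) = [0, 1] by decide, show List.range (Int.toNat 3) = [0, 1, 2] by decide]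
  · norm_num [PySem.List.pyRange, List.foldl, String.append_assoc, show List.range (Int.toNat 1) = [0] by decide, show List.range (Int.toNat 2) = [0, 1] by decide, show List.range (Int.toNat 3) = [0, 1, 2] by decide]
  · norm_num [PySem.List.pyRange, List.foldl, String.append_assoc, show List.range (Int.toNat 1) = [0] by decide, show List.range (Int.toNat 2) = [0, 1] by decide, show List.range (Int.toNat 3) = [0, 1, 2] by decide]
  · split_ifs <;> first | rfl | omega
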